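-- pv_equiv track=rewrite | github.com/RajeshMishra95/CircuitSimulation | qubit_setup.py | generate_z_ancillas
-- ===== SOURCE A (Python) =====
-- def generate_z_ancillas(distance, total_qubits):
--     z_ancillas = [2*distance]
--     for i in range(1,distance):
--         z_ancillas.append(z_ancillas[-1] + 2)
--     for j in z_ancillas:
--         if j + 4*distance - 2 < total_qubits:
--             z_ancillas.append(j + 4*distance -2)
--     return z_ancillas
-- ===== SOURCE B (Python) =====
-- def generate_z_ancillas(distance, total_qubits):
--     # Block 0: the unconditional seed, emitted by closed-form arithmetic.
--     result = [2*distance + 2*i for i in range(distance)]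
--     step = 4*distance - 2
--     k = 1
--     while True:
--         gen = [2*distance + 2*i + k*step for i in range(distance)
--                if 2*distance + 2*i + k*step < total_qubits]
--         if not gen:
--             return result
--         result += gen
--         k += 1
-- ===== Notes on version B (the rewrite author's own statement) =====
-- stated objective: alternative
-- what changed: A grows one list while iterating over it (a self-extending BFS queue where each visited element conditionally appends its successor); B never re-traverses the list: it emits the seed block by a closed arithmetic formula and then generates each later generation k directly as 2*distance+2*i+k*(4*distance-2) filtered by < total_qubits, stopping at the first empty generation.
-- outside the precondition, e.g. on generate_z_ancillas(0, -10): A returns [0], B returns []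
import Mathlib
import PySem

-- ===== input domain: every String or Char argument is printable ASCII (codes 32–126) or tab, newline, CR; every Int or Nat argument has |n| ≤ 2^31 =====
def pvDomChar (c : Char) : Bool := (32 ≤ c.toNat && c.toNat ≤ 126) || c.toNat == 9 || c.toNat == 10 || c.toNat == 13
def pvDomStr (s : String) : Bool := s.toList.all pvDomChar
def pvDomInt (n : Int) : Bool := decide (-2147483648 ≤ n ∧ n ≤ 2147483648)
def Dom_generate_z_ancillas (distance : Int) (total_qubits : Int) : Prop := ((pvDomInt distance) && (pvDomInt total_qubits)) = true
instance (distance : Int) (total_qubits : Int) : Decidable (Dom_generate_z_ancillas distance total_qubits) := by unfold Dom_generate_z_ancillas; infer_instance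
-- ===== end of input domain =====

-- B replaces A's self-extending queue (a list iterated while it grows) by direct
-- arithmetic enumeration of the generations; alternative decomposition, same cost,
-- equivalence proved for distance ≥ 1 (Pre_).

-- ===== PORT A =====
-- One iteration of Python's `for i in range(1, distance)` seed loop:
-- z_ancillas.append(z_ancillas[-1] + 2).  z[-1] is pyGet? z (-1); the list is
-- never empty when A runs it, so the .getD 0 default is never taken on Pre_.
def pvSeedStep (z : List Int) (_i : Int) : List Int :=
  z ++ [(PySem.List.pyGet? z (-1)).getD 0 + 2]

-- Hand port (with a comment, exact): Python's `for j in z_ancillas:` over a list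
-- that the loop body appends to is index-based iteration; `pending` is the part
-- of z_ancillas not yet visited and `acc` the whole list so far.  The fuel only
-- makes the recursion total in Lean: on every input admitted by Pre_ the pending
-- list empties strictly before the fuel runs out (proved in the lemmas below);
-- Python diverges exactly where the fuel could matter (distance ≤ 0, excluded).
def pvLoopA (s T : Int) : Nat → List Int → List Int → List Int
  | 0, _, acc => acc
  | _ + 1, [], acc => acc
  | f + 1, j :: rest, acc =>
      if j + s < T then pvLoopA s T f (rest ++ [j + s]) (acc ++ [j + s])
      else pvLoopA s T f rest acc

def pvFuelA (distance total_qubits : Int) : Nat :=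
  distance.toNat * ((total_qubits - 2 * distance).toNat + 1)

def generate_z_ancillas (distance : Int) (total_qubits : Int) : List Int :=
  let z0 := (PySem.List.pyRange 1 distance 1).foldl pvSeedStep [2 * distance]
  pvLoopA (4 * distance - 2) total_qubits (pvFuelA distance total_qubits) z0 z0

-- ===== PORT B =====
-- generation k (k ≥ 1): [2*d + 2*i + k*step for i in range(d) if … < total_qubits]
def pvGen (distance total_qubits : Int) (k : Nat) : List Int :=
  ((PySem.List.pyRange 0 distance 1).filter
      (fun i => decide (2 * distance + 2 * i + (k : Int) * (4 * distance - 2) < total_qubits))).map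
    (fun i => 2 * distance + 2 * i + (k : Int) * (4 * distance - 2))

-- Python's `while True:` with increasing k; the loop counter is ported as a Nat.
-- The fuel only makes the recursion total in Lean: pvFuelB is proved sufficient
-- below (each surviving generation needs base + k*step < total_qubits, and the
-- step is positive), so the zero-fuel branch is never taken.
def pvLoopB (distance total_qubits : Int) : Nat → Nat → List Int → List Int
  | 0, _, result => result
  | fB + 1, k, result =>
      if pvGen distance total_qubits k = [] then result
      else pvLoopB distance total_qubits fB (k + 1) (result ++ pvGen distance total_qubits k)

def pvFuelB (distance total_qubits : Int) : Nat :=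
  (total_qubits - 2 * distance).toNat + 1

def generate_z_ancillas_alt (distance : Int) (total_qubits : Int) : List Int :=
  pvLoopB distance total_qubits (pvFuelB distance total_qubits) 1
    ((PySem.List.pyRange 0 distance 1).map (fun i => 2 * distance + 2 * i))

-- ===== PRECONDITION & SPEC =====
-- Pre_ excludes distance ≤ 0, outside the natural domain of a code distance:
-- there Python A diverges whenever 6*distance - 2 < total_qubits, and otherwise
-- returns the degenerate singleton [2*distance] that B's arithmetic enumeration
-- (empty seed block) does not produce.
def Pre_generate_z_ancillas (distance : Int) (total_qubits : Int) : Prop :=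
  1 ≤ distance
instance (distance : Int) (total_qubits : Int) : Decidable (Pre_generate_z_ancillas distance total_qubits) := by
  unfold Pre_generate_z_ancillas; infer_instance

def pvWitness_generate_z_ancillas : Int × Int := (2, 30)

def Spec_generate_z_ancillas (distance : Int) (total_qubits : Int) (out : List Int) : Prop :=
  out = generate_z_ancillas_alt distance total_qubits
instance (distance : Int) (total_qubits : Int) (out : List Int) : Decidable (Spec_generate_z_ancillas distance total_qubits out) := by
  unfold Spec_generate_z_ancillas; infer_instance

-- ===== CLAIM (what is proved, stated in full; the proofs are below) =====
def Claim_equal_generate_z_ancillas : Prop := ∀ (distance : Int) (total_qubits : Int), Dom_generate_z_ancillas distance total_qubits → Pre_generate_z_ancillas distance total_qubits → Spec_generate_z_ancillas distance total_qubits (generate_z_ancillas distance total_qubits)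

-- ===== LEMMAS AND PROOFS =====

-- children of a visited batch: each j spawns j+s when j+s < T
def pvKids (s T : Int) (q : List Int) : List Int :=
  (q.map (· + s)).filter (fun v => decide (v < T))

theorem pvLoopA_nil (s T : Int) (f : Nat) (acc : List Int) :
    pvLoopA s T f [] acc = acc := by cases f <;> rfl

-- one full pass of A's queue over the batch q, costing exactly q.length fuel
theorem pvLoopA_pass (s T : Int) :
    ∀ (q p acc : List Int) (fuel : Nat),
      pvLoopA s T (fuel + q.length) (q ++ p) acc
        = pvLoopA s T fuel (p ++ pvKids s T q) (acc ++ pvKids s T q) := by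
  intro q
  induction q with
  | nil => intro p acc fuel; simp [pvKids]
  | cons j q' ih =>
      intro p acc fuel
      have hlen : fuel + (j :: q').length = (fuel + q'.length) + 1 := by
        simp [List.length_cons]; omega
      rw [hlen]
      by_cases h : j + s < T
      · have : pvLoopA s T ((fuel + q'.length) + 1) ((j :: q') ++ p) acc
            = pvLoopA s T (fuel + q'.length) ((q' ++ p) ++ [j + s]) (acc ++ [j + s]) := by
          simp [pvLoopA, h]
        rw [this]
        have h2 := ih (p ++ [j + s]) (acc ++ [j + s]) fuel
        have hk : pvKids s T (j :: q') = (j + s) :: pvKids s T q' := by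
          simp [pvKids, h]
        rw [hk]
        simpa [List.append_assoc] using h2
      · have : pvLoopA s T ((fuel + q'.length) + 1) ((j :: q') ++ p) acc
            = pvLoopA s T (fuel + q'.length) (q' ++ p) acc := by
          simp [pvLoopA, h]
        rw [this]
        have hk : pvKids s T (j :: q') = pvKids s T q' := by
          simp [pvKids, h]
        rw [hk]
        exact ih p acc fuel

theorem pvGen_length_le (d T : Int) (k : Nat) :
    (pvGen d T k).length ≤ d.toNat := by
  simp only [pvGen, List.length_map]
  calc (((PySem.List.pyRange 0 d 1).filter _)).length
      ≤ (PySem.List.pyRange 0 d 1).length := List.length_filter_le _ _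
    _ = d.toNat := by rw [PySem.List.length_pyRange_one]; omega

theorem pvFilter_and_absorb {p q : Int → Bool} (l : List Int)
    (h : ∀ i, q i = true → p i = true) :
    l.filter (fun i => q i && p i) = l.filter q := by
  have hf : (fun i => q i && p i) = q := by
    funext i
    cases hq : q i
    · simp
    · simp [h i hq]
  rw [hf]

theorem pvKids_gen (d T : Int) (hd : 1 ≤ d) (k : Nat) :
    pvKids (4 * d - 2) T (pvGen d T k) = pvGen d T (k + 1) := by
  have hexp : ∀ i : Int,
      2 * d + 2 * i + (k : Int) * (4 * d - 2) + (4 * d - 2)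
      = 2 * d + 2 * i + ((k : Int) + 1) * (4 * d - 2) := by intro i; ring
  have himp : ∀ i : Int,
      (decide (2 * d + 2 * i + ((k : Int) + 1) * (4 * d - 2) < T)) = true →
      (decide (2 * d + 2 * i + (k : Int) * (4 * d - 2) < T)) = true := by
    intro i hq
    simp only [decide_eq_true_eq] at hq ⊢
    have h2 : ((k : Int) + 1) * (4 * d - 2) = (k : Int) * (4 * d - 2) + (4 * d - 2) := by ring
    rw [h2] at hq
    omega
  have hflt := pvFilter_and_absorb (PySem.List.pyRange 0 d 1) himp
  simp only [pvKids, pvGen, List.map_map, List.filter_map, Function.comp_def,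
    List.filter_filter]
  push_cast
  simp only [hexp]
  rw [hflt]

theorem pvKids_block0 (d T : Int) (hd : 1 ≤ d) :
    pvKids (4 * d - 2) T ((PySem.List.pyRange 0 d 1).map (fun i => 2 * d + 2 * i))
      = pvGen d T 1 := by
  have hexp : ∀ i : Int, 2 * d + 2 * i + (4 * d - 2)
      = 2 * d + 2 * i + ((1 : Nat) : Int) * (4 * d - 2) := by intro i; push_cast; ring
  simp only [pvKids, pvGen, List.map_map, List.filter_map, Function.comp_def]
  simp only [hexp]

-- the heart: after the seed block, A's queue pass per generation equals B's loop
theorem pvGen_loop (d T : Int) :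
    ∀ (N : Nat), ∀ (k fuel : Nat) (acc q : List Int),
      1 ≤ d →
      (T - (2 * d + (k : Int) * (4 * d - 2))).toNat ≤ N →
      d.toNat * (N + 1) ≤ fuel →
      q.length ≤ d.toNat →
      pvKids (4 * d - 2) T q = pvGen d T (k + 1) →
      ∀ fB : Nat, N < fB →
      pvLoopA (4 * d - 2) T fuel q acc = pvLoopB d T fB (k + 1) acc := by
  intro N
  induction N using Nat.strong_induction_on with
  | _ N ih =>
    intro k fuel acc q hd hN hfuel hlen hkids fB hfB
    obtain ⟨fB', rfl⟩ : ∃ fB', fB = fB' + 1 := ⟨fB - 1, by omega⟩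
    have hfuel' : fuel = (fuel - q.length) + q.length := by
      have : d.toNat ≤ d.toNat * (N + 1) := Nat.le_mul_of_pos_right _ (by omega)
      omega
    have hA : pvLoopA (4 * d - 2) T fuel q acc
        = pvLoopA (4 * d - 2) T (fuel - q.length) (pvGen d T (k + 1))
            (acc ++ pvGen d T (k + 1)) := by
      conv_lhs => rw [hfuel']
      have hpass := pvLoopA_pass (4 * d - 2) T q [] acc (fuel - q.length)
      simpa [hkids] using hpass
    rw [hA]
    by_cases hg : pvGen d T (k + 1) = []
    · rw [hg, pvLoopA_nil]
      simp [pvLoopB, hg]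
    · obtain ⟨v, hv⟩ := List.exists_mem_of_ne_nil _ hg
      simp only [pvGen, List.mem_map, List.mem_filter] at hv
      obtain ⟨i, ⟨hiR, hiT⟩, _⟩ := hv
      rw [PySem.List.mem_pyRange_one] at hiR
      simp only [decide_eq_true_eq] at hiT
      have hexp : ((k : Int) + 1) * (4 * d - 2)
          = (k : Int) * (4 * d - 2) + (4 * d - 2) := by ring
      push_cast [hexp] at hiT
      have hNpos : 1 ≤ N := by omega
      have hstep : (T - (2 * d + ((k : Int) + 1) * (4 * d - 2))).toNat ≤ N - 1 := by
        rw [hexp]; omega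
      have hfuel2 : d.toNat * ((N - 1) + 1) ≤ fuel - q.length := by
        have h1 : d.toNat * (N + 1) = d.toNat * N + d.toNat := by ring
        have h2 : d.toNat * ((N - 1) + 1) = d.toNat * N := by
          congr 1; omega
        omega
      have hrec := ih (N - 1) (by omega) (k + 1) (fuel - q.length)
        (acc ++ pvGen d T (k + 1)) (pvGen d T (k + 1)) hd
        (by push_cast; exact hstep) hfuel2 (pvGen_length_le d T (k + 1))
        (pvKids_gen d T hd (k + 1)) fB' (by omega)
      rw [hrec]
      simp [pvLoopB, hg]

-- the seed loop builds the arithmetic block 0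
theorem pvSeed_build (d : Int) :
    ∀ (n : Nat) (c : Int), 1 ≤ c → c ≤ d → (d - c).toNat = n →
      (PySem.List.pyRange c d 1).foldl pvSeedStep
          ((PySem.List.pyRange 0 c 1).map (fun i => 2 * d + 2 * i))
        = (PySem.List.pyRange 0 d 1).map (fun i => 2 * d + 2 * i) := by
  intro n
  induction n with
  | zero =>
      intro c hc1 hcd h0
      have : c = d := by omega
      subst this
      rw [PySem.List.pyRange_one_eq_nil (a := c) (b := c) (by omega)]
      rfl
  | succ m ihm =>
      intro c hc1 hcd hm
      have hcd' : c < d := by omega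
      rw [PySem.List.pyRange_one_cons hcd']
      rw [List.foldl_cons]
      have hlast : ((PySem.List.pyRange 0 c 1).map (fun i => 2 * d + 2 * i)).getLast?
          = some (2 * d + 2 * (c - 1)) := by
        have hsplit : PySem.List.pyRange 0 c 1
            = PySem.List.pyRange 0 (c - 1) 1 ++ [c - 1] := by
          have := PySem.List.pyRange_one_succ_right (a := 0) (b := c - 1) (by omega)
          simpa using this
        rw [hsplit, List.map_append]
        simp
      have hstep : pvSeedStep ((PySem.List.pyRange 0 c 1).map (fun i => 2 * d + 2 * i)) c
          = (PySem.List.pyRange 0 (c + 1) 1).map (fun i => 2 * d + 2 * i) := by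
        unfold pvSeedStep
        rw [PySem.List.pyGet?_neg_one, hlast]
        rw [PySem.List.pyRange_one_succ_right (a := 0) (b := c) (by omega), List.map_append]
        simp
        ring
      rw [hstep]
      exact ihm (c + 1) (by omega) (by omega) (by omega)

-- ===== VERDICT (by name: the statement is the Claim_ definition above) =====
theorem generate_z_ancillas_spec : Claim_equal_generate_z_ancillas := by
  intro d T _hdom hpre
  unfold Spec_generate_z_ancillas
  have hd : 1 ≤ d := hpre
  have hseed : (PySem.List.pyRange 1 d 1).foldl pvSeedStep [2 * d]
      = (PySem.List.pyRange 0 d 1).map (fun i => 2 * d + 2 * i) := by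
    have h1 : ((PySem.List.pyRange 0 1 1).map (fun i => 2 * d + 2 * i)) = [2 * d] := by
      norm_num [PySem.List.pyRange_one]
    rw [← h1]
    exact pvSeed_build d (d - 1).toNat 1 (by omega) hd (by omega)
  have hlen : ((PySem.List.pyRange 0 d 1).map (fun i => 2 * d + 2 * i)).length ≤ d.toNat := by
    rw [List.length_map, PySem.List.length_pyRange_one]; omega
  show generate_z_ancillas d T = generate_z_ancillas_alt d T
  unfold generate_z_ancillas generate_z_ancillas_alt
  simp only [hseed]
  exact pvGen_loop d T (T - 2 * d).toNat 0 (pvFuelA d T)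
    ((PySem.List.pyRange 0 d 1).map (fun i => 2 * d + 2 * i))
    ((PySem.List.pyRange 0 d 1).map (fun i => 2 * d + 2 * i))
    hd (by push_cast; omega) (by unfold pvFuelA; omega) hlen
    (pvKids_block0 d T hd) (pvFuelB d T) (by unfold pvFuelB; omega)
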